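-- pv_equiv track=rewrite | github.com/jdigby99751/practice-python | src/JdPythonPractice/array/get_second_order_elements.py | get_second_order_elements
-- ===== SOURCE A (Python) =====
-- def get_second_order_elements(n: int, a: list[int]) -> list[int]:
--     max_value = a[0]
--     max_value_2 = None
--     min_value = a[0]
--     min_value_2 = None
--     for i in range(n):
--         if a[i] > max_value:
--             max_value_2 = max_value
--             max_value = a[i]
--         elif max_value_2 is None and a[i] != max_value:
--             max_value_2 = a[i]
--         elif max_value_2 is not None and a[i] > max_value_2 and a[i] != max_value:
--             max_value_2 = a[i]
--         if a[i] < min_value: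
--             min_value_2 = min_value
--             min_value = a[i]
--         elif min_value_2 is None and a[i] != min_value:
--             min_value_2 = a[i]
--         elif min_value_2 is not None and a[i] < min_value_2 and a[i] != min_value:
--             min_value_2 = a[i]
--
--     return [max_value_2, min_value_2]
-- ===== SOURCE B (Python) =====
-- def get_second_order_elements(n: int, a: list[int]) -> list[int]:
--     d = sorted({a[i] for i in range(n)})
--     if len(d) >= 2:
--         return [d[-2], d[1]]
--     return [None, None]
-- ===== Notes on version B (the rewrite author's own statement) =====
-- stated objective: simpler
-- what changed: Replaces the single-pass four-variable second-max/second-min tracking with sort-the-distinct-values-and-index: d = sorted(set(a[:n])) then [d[-2], d[1]], or [None, None] when fewer than two distinct values.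
import Mathlib
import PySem

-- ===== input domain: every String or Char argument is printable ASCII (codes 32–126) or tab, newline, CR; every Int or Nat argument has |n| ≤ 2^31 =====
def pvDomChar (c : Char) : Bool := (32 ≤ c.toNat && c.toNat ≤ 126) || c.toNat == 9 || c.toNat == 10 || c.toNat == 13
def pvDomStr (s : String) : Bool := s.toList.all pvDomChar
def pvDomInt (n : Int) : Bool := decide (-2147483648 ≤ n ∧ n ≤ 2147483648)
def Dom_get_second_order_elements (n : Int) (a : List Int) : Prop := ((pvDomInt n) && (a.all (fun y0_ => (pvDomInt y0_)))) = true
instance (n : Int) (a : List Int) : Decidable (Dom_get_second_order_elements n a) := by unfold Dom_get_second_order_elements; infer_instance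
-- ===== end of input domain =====

-- B replaces A's single-pass second-max/second-min tracking by sorting the distinct values
-- and indexing (simpler); equal on Pre_ (a nonempty, n ≤ len(a)); outside Pre_ A raises.


-- ===== PORT A =====
-- the max-branch of A's loop body (the first if/elif/elif chain), on the value a[i]
def pvMaxUpd (mx : Int) (mx2 : Option Int) (x : Int) : Int × Option Int :=
  if mx < x then (x, some mx)
  else if mx2 = none ∧ x ≠ mx then (mx, some x)
  else match mx2 with
    | some m2 => if m2 < x ∧ x ≠ mx then (mx, some x) else (mx, mx2)
    | none => (mx, mx2)

-- the min-branch of A's loop body (the second if/elif/elif chain)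
def pvMinUpd (mn : Int) (mn2 : Option Int) (x : Int) : Int × Option Int :=
  if x < mn then (x, some mn)
  else if mn2 = none ∧ x ≠ mn then (mn, some x)
  else match mn2 with
    | some m2 => if x < m2 ∧ x ≠ mn then (mn, some x) else (mn, mn2)
    | none => (mn, mn2)

-- one iteration of A's loop on state (max_value, max_value_2, min_value, min_value_2)
def pvStepA (st : Int × Option Int × Int × Option Int) (x : Int) : Int × Option Int × Int × Option Int :=
  let (mx, mx2, mn, mn2) := st
  let (mx', mx2') := pvMaxUpd mx mx2 x
  let (mn', mn2') := pvMinUpd mn mn2 x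
  (mx', mx2', mn', mn2')

def get_second_order_elements (n : Int) (a : List Int) : List (Option Int) :=
  match PySem.List.pyGet? a 0 with
  | none => [none, none]   -- Python raises IndexError here (a = []); excluded by Pre_
  | some a0 =>
    let st := (PySem.List.pyRange 0 n 1).foldl
      (fun st i => pvStepA st (PySem.List.pyGetD a i 0)) (a0, none, a0, none)
      -- a[i]; the default is never used under Pre_ (0 ≤ i < n ≤ len a)
    [st.2.1, st.2.2.2]

-- ===== PORT B =====
def get_second_order_elements_alt (n : Int) (a : List Int) : List (Option Int) :=
  let d := PySem.List.sorted
    (PySem.Set.ofList ((PySem.List.pyRange 0 n 1).map (fun i => PySem.List.pyGetD a i 0)))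
    (fun x => x) false
  if 2 ≤ d.length then [PySem.List.pyGet? d (-2), PySem.List.pyGet? d 1]
  else [none, none]

-- ===== PRECONDITION & SPEC =====
-- Pre_ excludes exactly the inputs where Python A raises IndexError: empty a (the
-- unconditional a[0]) and n > len(a) (the a[i] lookups for i in range(n)).
def Pre_get_second_order_elements (n : Int) (a : List Int) : Prop :=
  a ≠ [] ∧ n ≤ (a.length : Int)
instance (n : Int) (a : List Int) : Decidable (Pre_get_second_order_elements n a) := by
  unfold Pre_get_second_order_elements; infer_instance

def pvWitness_get_second_order_elements : Int × List Int := (3, [1, 2, 3])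

def Spec_get_second_order_elements (n : Int) (a : List Int) (out : List (Option Int)) : Prop :=
  out = get_second_order_elements_alt n a
instance (n : Int) (a : List Int) (out : List (Option Int)) : Decidable (Spec_get_second_order_elements n a out) := by
  unfold Spec_get_second_order_elements; infer_instance

-- ===== CLAIM (what is proved, stated in full; the proofs are below) =====
def Claim_equal_get_second_order_elements : Prop := ∀ (n : Int) (a : List Int), Dom_get_second_order_elements n a → Pre_get_second_order_elements n a → Spec_get_second_order_elements n a (get_second_order_elements n a)
-- ===== LEMMAS AND PROOFS =====

-- invariant for the max accumulator over the multiset m of values seen so far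
def pvInvMax (m : List Int) (mx : Int) (mx2 : Option Int) : Prop :=
  mx ∈ m ∧ (∀ y ∈ m, y ≤ mx) ∧
  (match mx2 with
   | none => ∀ y ∈ m, y = mx
   | some v => v ∈ m ∧ v < mx ∧ ∀ y ∈ m, y ≠ mx → y ≤ v)

def pvInvMin (m : List Int) (mn : Int) (mn2 : Option Int) : Prop :=
  mn ∈ m ∧ (∀ y ∈ m, mn ≤ y) ∧
  (match mn2 with
   | none => ∀ y ∈ m, y = mn
   | some v => v ∈ m ∧ mn < v ∧ ∀ y ∈ m, y ≠ mn → v ≤ y)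

def pvInv (m : List Int) (st : Int × Option Int × Int × Option Int) : Prop :=
  pvInvMax m st.1 st.2.1 ∧ pvInvMin m st.2.2.1 st.2.2.2

theorem pvInvMax_step (m : List Int) (mx : Int) (mx2 : Option Int) (x : Int)
    (h : pvInvMax m mx mx2) :
    pvInvMax (x :: m) (pvMaxUpd mx mx2 x).1 (pvMaxUpd mx mx2 x).2 := by
  obtain ⟨hmem, hub, hrest⟩ := h
  cases mx2 with
  | none =>
    by_cases h1 : mx < x
    · simp only [pvMaxUpd, if_pos h1, pvInvMax]
      exact ⟨List.mem_cons_self, fun y hy => by rcases List.mem_cons.1 hy with rfl | hy' <;> [exact le_refl _; exact le_trans (hub y hy') h1.le],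
        List.mem_cons_of_mem _ hmem, h1, fun y hy hne => by rcases List.mem_cons.1 hy with rfl | hy' <;> [exact absurd rfl hne; exact hub y hy']⟩
    · by_cases h2 : x ≠ mx
      · simp only [pvMaxUpd]
        rw [if_neg h1, if_pos (⟨trivial, h2⟩ : True ∧ x ≠ mx)]
        simp only [pvInvMax]
        refine ⟨List.mem_cons_of_mem _ hmem, fun y hy => ?_, List.mem_cons_self, by omega, fun y hy hne => ?_⟩
        · rcases List.mem_cons.1 hy with rfl | hy' <;> [omega; exact hub y hy']
        · rcases List.mem_cons.1 hy with rfl | hy' <;> [exact le_refl _; exact absurd (hrest y hy') hne]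
      · rw [not_not] at h2
        subst h2
        have hns : ¬(True ∧ x ≠ x) := by simp
        simp only [pvMaxUpd]
        rw [if_neg h1, if_neg hns]
        simp only [pvInvMax]
        exact ⟨List.mem_cons_self, fun y hy => by rcases List.mem_cons.1 hy with rfl | hy' <;> [exact le_refl _; exact hub y hy'],
          fun y hy => by rcases List.mem_cons.1 hy with rfl | hy' <;> [rfl; exact hrest y hy']⟩
  | some m2 =>
    obtain ⟨hm2mem, hm2lt, hm2ub⟩ := hrest
    have hns : ¬((some m2 : Option Int) = none ∧ x ≠ mx) := by simp
    by_cases h1 : mx < x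
    · simp only [pvMaxUpd, if_pos h1, pvInvMax]
      exact ⟨List.mem_cons_self, fun y hy => by rcases List.mem_cons.1 hy with rfl | hy' <;> [exact le_refl _; exact le_trans (hub y hy') h1.le],
        List.mem_cons_of_mem _ hmem, h1, fun y hy hne => by rcases List.mem_cons.1 hy with rfl | hy' <;> [exact absurd rfl hne; exact hub y hy']⟩
    · by_cases h3 : m2 < x ∧ x ≠ mx
      · simp only [pvMaxUpd]
        rw [if_neg h1, if_neg hns, if_pos h3]
        simp only [pvInvMax]
        refine ⟨List.mem_cons_of_mem _ hmem, fun y hy => ?_, List.mem_cons_self, by omega, fun y hy hne => ?_⟩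
        · rcases List.mem_cons.1 hy with rfl | hy' <;> [omega; exact hub y hy']
        · rcases List.mem_cons.1 hy with rfl | hy' <;> [exact le_refl _; exact le_trans (hm2ub y hy' hne) h3.1.le]
      · simp only [pvMaxUpd]
        rw [if_neg h1, if_neg hns, if_neg h3]
        simp only [pvInvMax]
        refine ⟨List.mem_cons_of_mem _ hmem, fun y hy => ?_, List.mem_cons_of_mem _ hm2mem, hm2lt, fun y hy hne => ?_⟩
        · rcases List.mem_cons.1 hy with rfl | hy' <;> [omega; exact hub y hy']
        · rcases List.mem_cons.1 hy with rfl | hy' <;> [omega; exact hm2ub y hy' hne]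

theorem pvInvMin_step (m : List Int) (mn : Int) (mn2 : Option Int) (x : Int)
    (h : pvInvMin m mn mn2) :
    pvInvMin (x :: m) (pvMinUpd mn mn2 x).1 (pvMinUpd mn mn2 x).2 := by
  obtain ⟨hmem, hlb, hrest⟩ := h
  cases mn2 with
  | none =>
    by_cases h1 : x < mn
    · simp only [pvMinUpd, if_pos h1, pvInvMin]
      exact ⟨List.mem_cons_self, fun y hy => by rcases List.mem_cons.1 hy with rfl | hy' <;> [exact le_refl _; exact le_trans h1.le (hlb y hy')],
        List.mem_cons_of_mem _ hmem, h1, fun y hy hne => by rcases List.mem_cons.1 hy with rfl | hy' <;> [exact absurd rfl hne; exact hlb y hy']⟩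
    · by_cases h2 : x ≠ mn
      · simp only [pvMinUpd]
        rw [if_neg h1, if_pos (⟨trivial, h2⟩ : True ∧ x ≠ mn)]
        simp only [pvInvMin]
        refine ⟨List.mem_cons_of_mem _ hmem, fun y hy => ?_, List.mem_cons_self, by omega, fun y hy hne => ?_⟩
        · rcases List.mem_cons.1 hy with rfl | hy' <;> [omega; exact hlb y hy']
        · rcases List.mem_cons.1 hy with rfl | hy' <;> [exact le_refl _; exact absurd (hrest y hy') hne]
      · rw [not_not] at h2
        subst h2
        have hns : ¬(True ∧ x ≠ x) := by simp
        simp only [pvMinUpd]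
        rw [if_neg h1, if_neg hns]
        simp only [pvInvMin]
        exact ⟨List.mem_cons_self, fun y hy => by rcases List.mem_cons.1 hy with rfl | hy' <;> [exact le_refl _; exact hlb y hy'],
          fun y hy => by rcases List.mem_cons.1 hy with rfl | hy' <;> [rfl; exact hrest y hy']⟩
  | some m2 =>
    obtain ⟨hm2mem, hm2lt, hm2lb⟩ := hrest
    have hns : ¬((some m2 : Option Int) = none ∧ x ≠ mn) := by simp
    by_cases h1 : x < mn
    · simp only [pvMinUpd, if_pos h1, pvInvMin]
      exact ⟨List.mem_cons_self, fun y hy => by rcases List.mem_cons.1 hy with rfl | hy' <;> [exact le_refl _; exact le_trans h1.le (hlb y hy')],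
        List.mem_cons_of_mem _ hmem, h1, fun y hy hne => by rcases List.mem_cons.1 hy with rfl | hy' <;> [exact absurd rfl hne; exact hlb y hy']⟩
    · by_cases h3 : x < m2 ∧ x ≠ mn
      · simp only [pvMinUpd]
        rw [if_neg h1, if_neg hns, if_pos h3]
        simp only [pvInvMin]
        refine ⟨List.mem_cons_of_mem _ hmem, fun y hy => ?_, List.mem_cons_self, by omega, fun y hy hne => ?_⟩
        · rcases List.mem_cons.1 hy with rfl | hy' <;> [omega; exact hlb y hy']
        · rcases List.mem_cons.1 hy with rfl | hy' <;> [exact le_refl _; exact le_trans h3.1.le (hm2lb y hy' hne)]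
      · simp only [pvMinUpd]
        rw [if_neg h1, if_neg hns, if_neg h3]
        simp only [pvInvMin]
        refine ⟨List.mem_cons_of_mem _ hmem, fun y hy => ?_, List.mem_cons_of_mem _ hm2mem, hm2lt, fun y hy hne => ?_⟩
        · rcases List.mem_cons.1 hy with rfl | hy' <;> [omega; exact hlb y hy']
        · rcases List.mem_cons.1 hy with rfl | hy' <;> [omega; exact hm2lb y hy' hne]

theorem pvInv_mem_congr (m m' : List Int) (st : Int × Option Int × Int × Option Int)
    (hmm : ∀ y, y ∈ m ↔ y ∈ m') (h : pvInv m st) : pvInv m' st := by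
  obtain ⟨⟨hmx, hub, hmx2⟩, hmn, hlb, hmn2⟩ := h
  refine ⟨⟨(hmm _).1 hmx, fun y hy => hub y ((hmm y).2 hy), ?_⟩,
    (hmm _).1 hmn, fun y hy => hlb y ((hmm y).2 hy), ?_⟩
  · cases hst : st.2.1 with
    | none => rw [hst] at hmx2; exact fun y hy => hmx2 y ((hmm y).2 hy)
    | some v =>
      rw [hst] at hmx2
      exact ⟨(hmm _).1 hmx2.1, hmx2.2.1, fun y hy hne => hmx2.2.2 y ((hmm y).2 hy) hne⟩
  · cases hst : st.2.2.2 with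
    | none => rw [hst] at hmn2; exact fun y hy => hmn2 y ((hmm y).2 hy)
    | some v =>
      rw [hst] at hmn2
      exact ⟨(hmm _).1 hmn2.1, hmn2.2.1, fun y hy hne => hmn2.2.2 y ((hmm y).2 hy) hne⟩

theorem pvInv_foldl (p : List Int) (m : List Int) (st : Int × Option Int × Int × Option Int)
    (h : pvInv m st) : pvInv (p.reverse ++ m) (p.foldl pvStepA st) := by
  induction p generalizing m st with
  | nil => simpa using h
  | cons y p ih =>
    obtain ⟨mx, mx2, mn, mn2⟩ := st
    have hstep : pvInv (y :: m) (pvStepA (mx, mx2, mn, mn2) y) := by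
      simp only [pvStepA]
      exact ⟨pvInvMax_step m mx mx2 y h.1, pvInvMin_step m mn mn2 y h.2⟩
    have := ih (y :: m) _ hstep
    simpa [List.append_assoc] using this

-- the loop's index reads a[i] for i in range(n) are exactly the values a[:n]
theorem pvMapRange_take (a : List Int) (n : Int) (h0 : 0 ≤ n) (hlen : n ≤ (a.length : Int)) :
    (PySem.List.pyRange 0 n 1).map (fun i => PySem.List.pyGetD a i 0) = a.take n.toNat := by
  have hn : ((a.take n.toNat).length : Int) = n := by
    simp only [List.length_take]
    omega
  have base := PySem.List.map_pyGetD_pyRange_zero' (xs := a.take n.toNat) (d := 0)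
  rw [hn] at base
  refine (List.map_congr_left ?_).trans base
  intro i hi
  rw [PySem.List.mem_pyRange_one] at hi
  have h1 : i.toNat < (a.take n.toNat).length := by simp only [List.length_take]; omega
  have h2 : i.toNat < a.length := by omega
  have hit : i = (i.toNat : Int) := by omega
  rw [hit, PySem.List.pyGetD_natCast, PySem.List.pyGetD_natCast,
      List.getD_eq_getElem _ _ h2, List.getD_eq_getElem _ _ h1]
  exact (List.getElem_take).symm

-- ===== VERDICT (by name: the statement is the Claim_ definition above) =====
theorem get_second_order_elements_spec : Claim_equal_get_second_order_elements := by
  intro n a _ hpre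
  obtain ⟨hne, hlen⟩ := hpre
  unfold Spec_get_second_order_elements
  cases a with
  | nil => exact absurd rfl hne
  | cons a0 t =>
    by_cases hn : n ≤ 0
    · simp [get_second_order_elements, get_second_order_elements_alt,
        PySem.List.pyRange_one_eq_nil hn]
    · have hn0 : 0 ≤ n := by omega
      have hmap := pvMapRange_take (a0 :: t) n hn0 hlen
      obtain ⟨k, hk⟩ : ∃ k, n.toNat = k + 1 := ⟨n.toNat - 1, by omega⟩
      have hvals : (a0 :: t).take n.toNat = a0 :: t.take k := by rw [hk]; rfl
      have hAeq : get_second_order_elements n (a0 :: t) =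
          [(((a0 :: t).take n.toNat).foldl pvStepA (a0, none, a0, none)).2.1,
           (((a0 :: t).take n.toNat).foldl pvStepA (a0, none, a0, none)).2.2.2] := by
        simp only [get_second_order_elements, PySem.List.pyGet?_zero_cons]
        rw [← hmap, List.foldl_map]
      have hBeq : get_second_order_elements_alt n (a0 :: t) =
          (if 2 ≤ (PySem.List.sorted (PySem.Set.ofList ((a0 :: t).take n.toNat)) (fun x => x) false).length
           then [PySem.List.pyGet? (PySem.List.sorted (PySem.Set.ofList ((a0 :: t).take n.toNat)) (fun x => x) false) (-2),
                 PySem.List.pyGet? (PySem.List.sorted (PySem.Set.ofList ((a0 :: t).take n.toNat)) (fun x => x) false) 1]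
           else [none, none]) := by
        simp only [get_second_order_elements_alt, hmap]
      rw [hAeq, hBeq]
      set vals := (a0 :: t).take n.toNat with hv
      set st := vals.foldl pvStepA (a0, none, a0, none) with hst
      set d := PySem.List.sorted (PySem.Set.ofList vals) (fun x => x) false with hd
      have ha0v : a0 ∈ vals := by rw [hvals]; exact List.mem_cons_self
      have hinv0 : pvInv [a0] (a0, none, a0, none) := by
        refine ⟨⟨List.mem_cons_self, ?_, ?_⟩, List.mem_cons_self, ?_, ?_⟩ <;>
          · intro y hy
            rcases List.mem_cons.1 hy with rfl | hy' <;> simp_all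
      have hinv : pvInv vals st := by
        refine pvInv_mem_congr _ _ _ (fun y => ?_) (pvInv_foldl vals [a0] _ hinv0)
        simp only [List.mem_append, List.mem_reverse, List.mem_singleton]
        constructor
        · rintro (h | rfl)
          · exact h
          · exact ha0v
        · exact Or.inl
      obtain ⟨⟨hmx_mem, hub, hmx2⟩, hmn_mem, hlb, hmn2⟩ := hinv
      have hmemd : ∀ y, y ∈ d ↔ y ∈ vals := fun y => by
        rw [hd, PySem.List.mem_sorted, PySem.Set.mem_ofList]
      have hpw : d.Pairwise (· < ·) := by
        rw [hd]
        exact PySem.List.sorted_ofList_pairwise_lt vals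
      have hmono := List.pairwise_iff_getElem.1 hpw
      have hdne : d ≠ [] := by
        intro hnil
        have := (hmemd a0).2 ha0v
        rw [hnil] at this
        exact (List.not_mem_nil) this
      by_cases hd2 : 2 ≤ d.length
      · rw [if_pos hd2]
        obtain ⟨i, hi, hieq⟩ := List.getElem_of_mem ((hmemd _).2 hmx_mem)
        have hilast : i = d.length - 1 := by
          by_contra hne'
          have hlt := hmono i (d.length - 1) hi (by omega) (by omega)
          have hmem' := hub _ ((hmemd _).1 (List.getElem_mem (by omega : d.length - 1 < d.length)))
          omega
        subst hilast
        have hmx_last : d[d.length - 1]'(by omega) = st.1 := hieq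
        obtain ⟨i0, hi0, hi0eq⟩ := List.getElem_of_mem ((hmemd _).2 hmn_mem)
        have hifirst : i0 = 0 := by
          by_contra hne'
          have hlt := hmono 0 i0 (by omega) hi0 (by omega)
          have hmem' := hlb _ ((hmemd _).1 (List.getElem_mem (by omega : 0 < d.length)))
          omega
        subst hifirst
        have hmn_first : d[0]'(by omega) = st.2.2.1 := hi0eq
        rw [PySem.List.pyGet?_neg_ofNat d 2 (by omega) (by omega),
            PySem.List.pyGet?_of_nonneg d (by omega),
            List.getElem?_eq_getElem (by omega : d.length - 2 < d.length),
            List.getElem?_eq_getElem (by omega : (1:Int).toNat < d.length)]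
        have hmx2some : st.2.1 = some (d[d.length - 2]'(by omega)) := by
          cases hc : st.2.1 with
          | none =>
            exfalso
            rw [hc] at hmx2
            have e0 := hmx2 _ ((hmemd _).1 (List.getElem_mem (by omega : 0 < d.length)))
            have e1 := hmx2 _ ((hmemd _).1 (List.getElem_mem (by omega : 1 < d.length)))
            have := hmono 0 1 (by omega) (by omega) (by omega)
            omega
          | some v =>
            rw [hc] at hmx2
            obtain ⟨hvmem, hvlt, hvub⟩ := hmx2
            have hne2 : d[d.length - 2]'(by omega) < st.1 := by
              have := hmono (d.length - 2) (d.length - 1) (by omega) (by omega) (by omega)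
              omega
            have hA2 : d[d.length - 2]'(by omega) ≤ v :=
              hvub _ ((hmemd _).1 (List.getElem_mem (by omega))) (by omega)
            have hB2 : v ≤ d[d.length - 2]'(by omega) := by
              obtain ⟨j, hj, hjeq⟩ := List.getElem_of_mem ((hmemd v).2 hvmem)
              have hjne : j ≠ d.length - 1 := by
                intro hjl
                subst hjl
                exact absurd (hjeq.symm.trans hmx_last) (by omega)
              rcases Nat.lt_or_ge j (d.length - 2) with hjlt | hjge
              · have := hmono j (d.length - 2) hj (by omega) hjlt
                omega
              · have hj2 : j = d.length - 2 := by omega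
                subst hj2
                exact hjeq.symm.le
            congr 1
            omega
        have hmn2some : st.2.2.2 = some (d[1]'(by omega)) := by
          cases hc : st.2.2.2 with
          | none =>
            exfalso
            rw [hc] at hmn2
            have e0 := hmn2 _ ((hmemd _).1 (List.getElem_mem (by omega : 0 < d.length)))
            have e1 := hmn2 _ ((hmemd _).1 (List.getElem_mem (by omega : 1 < d.length)))
            have := hmono 0 1 (by omega) (by omega) (by omega)
            omega
          | some v =>
            rw [hc] at hmn2
            obtain ⟨hvmem, hvlt, hvlb⟩ := hmn2
            have hne2 : st.2.2.1 < d[1]'(by omega) := by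
              have := hmono 0 1 (by omega) (by omega) (by omega)
              omega
            have hA2 : v ≤ d[1]'(by omega) :=
              hvlb _ ((hmemd _).1 (List.getElem_mem (by omega))) (by omega)
            have hB2 : d[1]'(by omega) ≤ v := by
              obtain ⟨j, hj, hjeq⟩ := List.getElem_of_mem ((hmemd v).2 hvmem)
              have hjne : j ≠ 0 := by
                intro hjl
                subst hjl
                exact absurd (hjeq.symm.trans hmn_first) (by omega)
              rcases Nat.lt_or_ge 1 j with hjlt | hjge
              · have := hmono 1 j (by omega) hj hjlt
                omega
              · have hj1 : j = 1 := by omega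
                subst hj1
                exact hjeq.le
            congr 1
            omega
        rw [hmx2some, hmn2some]
        norm_num
      · rw [if_neg hd2]
        have hL : d.length = 1 := by
          have : 0 < d.length := List.length_pos_of_ne_nil hdne
          omega
        have hall : ∀ y ∈ vals, y = d[0]'(by omega) := by
          intro y hy
          obtain ⟨j, hj, hjeq⟩ := List.getElem_of_mem ((hmemd y).2 hy)
          have hj0 : j = 0 := by omega
          subst hj0
          exact hjeq.symm
        have hmx2none : st.2.1 = none := by
          cases hc : st.2.1 with
          | none => rfl
          | some v =>
            exfalso
            rw [hc] at hmx2
            obtain ⟨hvmem, hvlt, -⟩ := hmx2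
            have hv1 := hall _ hvmem
            have hv2 := hall _ hmx_mem
            omega
        have hmn2none : st.2.2.2 = none := by
          cases hc : st.2.2.2 with
          | none => rfl
          | some v =>
            exfalso
            rw [hc] at hmn2
            obtain ⟨hvmem, hvlt, -⟩ := hmn2
            have hv1 := hall _ hvmem
            have hv2 := hall _ hmn_mem
            omega
        rw [hmx2none, hmn2none]
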